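-- pv_equiv track=rewrite | github.com/Technik-Tueftler/TeTueChallenge | x003C/source/korbi_korb.py | create_playground_with_dimensions
-- ===== SOURCE A (Python) =====
-- def create_playground_with_dimensions(n) -> list:
--     matrix = []
--     for y in range(0, (n * 2) + 2):
--         row = []
--         for x in range(0, (n * 2) + 2):
--             if x == 0:
--                 if (y % 2) == 0 and y != 0:
--                     row.append(str(int(y/2)))
--                 else:
--                     row.append(' ')
--             elif y == 0:
--                 if (x % 2) == 0 and x != 0:
--                     row.append(str(int(x)))
--                 else:
--                     row.append('!')
--             else:
--                 if (y % 2) == 0 and x % 2 == 0: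
--                     row.append(' ')
--                 if (y % 2) == 0 and x % 2 != 0:
--                     row.append("|")
--                 if (y % 2) != 0 and x % 2 == 0:
--                     row.append(" --- ")
--                 if (y % 2) != 0 and x % 2 != 0:
--                     row.append("+")
--         matrix.append(row)
--     return matrix
-- ===== SOURCE B (Python) =====
-- def create_playground_with_dimensions(n) -> list:
--     if n < 0:
--         return []
--     header = [' ']
--     for k in range(1, n + 1):
--         header += ['!', str(2 * k)]
--     header.append('!')
--     pipe_tail = ['|', ' '] * n + ['|']
--     plus_tail = ['+', ' --- '] * n + ['+']
--     matrix = [header]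
--     for y in range(1, 2 * n + 2):
--         if y % 2:
--             matrix.append([' '] + plus_tail)
--         else:
--             matrix.append([str(y // 2)] + pipe_tail)
--     return matrix
-- ===== Notes on version B (the rewrite author's own statement) =====
-- stated objective: simpler
-- what changed: B assembles each row whole from precomputed repeating templates (header pairs, ['|',' ']*n and ['+',' --- ']*n tails built by list repetition) instead of A's per-cell four-way parity branch inside nested loops.
import Mathlib
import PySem

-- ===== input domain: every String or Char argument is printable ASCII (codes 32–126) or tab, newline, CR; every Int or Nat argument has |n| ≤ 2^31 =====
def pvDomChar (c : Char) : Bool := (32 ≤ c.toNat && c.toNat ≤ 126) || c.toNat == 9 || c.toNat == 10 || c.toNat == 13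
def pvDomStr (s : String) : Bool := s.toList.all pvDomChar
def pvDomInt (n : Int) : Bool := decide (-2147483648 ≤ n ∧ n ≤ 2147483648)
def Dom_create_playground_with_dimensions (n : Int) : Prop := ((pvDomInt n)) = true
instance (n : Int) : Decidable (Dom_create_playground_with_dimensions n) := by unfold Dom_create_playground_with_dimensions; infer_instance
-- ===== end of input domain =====

-- B builds each row from whole-row templates (header, pipe row, plus row assembled by
-- list repetition) instead of A's per-cell four-way parity branch; objective: simpler.

-- ===== PORT A =====
-- str(int(y/2)) is ported as toStr (floordiv y 2): y is an even nonneg loop index ≤ 2^32+2,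
-- so float division y/2 is exact and int(y/2) = y // 2.
def create_playground_with_dimensions (n : Int) : List (List String) :=
  (PySem.List.pyRange 0 (n * 2 + 2)).foldl (fun matrix y =>
    let row := (PySem.List.pyRange 0 (n * 2 + 2)).foldl (fun row x =>
      if x == 0 then
        if PySem.Int.mod y 2 == 0 && y != 0 then
          row ++ [PySem.Int.toStr (PySem.Int.floordiv y 2)]
        else
          row ++ [" "]
      else if y == 0 then
        if PySem.Int.mod x 2 == 0 && x != 0 then
          row ++ [PySem.Int.toStr x]
        else
          row ++ ["!"]
      else
        let row := if PySem.Int.mod y 2 == 0 && PySem.Int.mod x 2 == 0 then row ++ [" "] else row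
        let row := if PySem.Int.mod y 2 == 0 && PySem.Int.mod x 2 != 0 then row ++ ["|"] else row
        let row := if PySem.Int.mod y 2 != 0 && PySem.Int.mod x 2 == 0 then row ++ [" --- "] else row
        if PySem.Int.mod y 2 != 0 && PySem.Int.mod x 2 != 0 then row ++ ["+"] else row) []
    matrix ++ [row]) []

-- ===== PORT B =====
def create_playground_with_dimensions_alt (n : Int) : List (List String) :=
  if n < 0 then []
  else
    let header := (PySem.List.pyRange 1 (n + 1)).foldl
      (fun h k => h ++ ["!", PySem.Int.toStr (2 * k)]) [" "]
    let header := header ++ ["!"]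
    let pipe_tail := (List.replicate n.toNat ["|", " "]).flatten ++ ["|"]
    let plus_tail := (List.replicate n.toNat ["+", " --- "]).flatten ++ ["+"]
    (PySem.List.pyRange 1 (2 * n + 2)).foldl (fun m y =>
      m ++ [if PySem.Int.mod y 2 != 0 then [" "] ++ plus_tail
            else [PySem.Int.toStr (PySem.Int.floordiv y 2)] ++ pipe_tail]) [header]

-- ===== PRECONDITION & SPEC =====
def Spec_create_playground_with_dimensions (n : Int) (out : List (List String)) : Prop := out = create_playground_with_dimensions_alt n
instance (n : Int) (out : List (List String)) : Decidable (Spec_create_playground_with_dimensions n out) := by unfold Spec_create_playground_with_dimensions; infer_instance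

-- ===== CLAIM (what is proved, stated in full; the proofs are below) =====
def Claim_equal_create_playground_with_dimensions : Prop := ∀ (n : Int), Dom_create_playground_with_dimensions n → Spec_create_playground_with_dimensions n (create_playground_with_dimensions n)

-- ===== LEMMAS AND PROOFS =====

-- the single string A's inner loop body appends for a given (y, x)
def cellA (y x : Int) : String :=
  if x == 0 then
    if PySem.Int.mod y 2 == 0 && y != 0 then PySem.Int.toStr (PySem.Int.floordiv y 2) else " "
  else if y == 0 then
    if PySem.Int.mod x 2 == 0 && x != 0 then PySem.Int.toStr x else "!"
  else if PySem.Int.mod y 2 == 0 then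
    if PySem.Int.mod x 2 == 0 then " " else "|"
  else
    if PySem.Int.mod x 2 == 0 then " --- " else "+"

lemma cellA_step (y x : Int) (row : List String) :
    (if x == 0 then
        if PySem.Int.mod y 2 == 0 && y != 0 then
          row ++ [PySem.Int.toStr (PySem.Int.floordiv y 2)]
        else
          row ++ [" "]
      else if y == 0 then
        if PySem.Int.mod x 2 == 0 && x != 0 then
          row ++ [PySem.Int.toStr x]
        else
          row ++ ["!"]
      else
        let row := if PySem.Int.mod y 2 == 0 && PySem.Int.mod x 2 == 0 then row ++ [" "] else row
        let row := if PySem.Int.mod y 2 == 0 && PySem.Int.mod x 2 != 0 then row ++ ["|"] else row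
        let row := if PySem.Int.mod y 2 != 0 && PySem.Int.mod x 2 == 0 then row ++ [" --- "] else row
        if PySem.Int.mod y 2 != 0 && PySem.Int.mod x 2 != 0 then row ++ ["+"] else row)
    = row ++ [cellA y x] := by
  unfold cellA
  by_cases hx : x == 0 <;> by_cases hy : y == 0 <;>
    by_cases hym : PySem.Int.mod y 2 == 0 <;> by_cases hxm : PySem.Int.mod x 2 == 0 <;>
    simp [hx, hy] <;> split_ifs <;> first | rfl | omega

def rowA (n y : Int) : List String :=
  (PySem.List.pyRange 0 (n * 2 + 2)).map (cellA y)

lemma A_normal (n : Int) :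
    create_playground_with_dimensions n
      = (PySem.List.pyRange 0 (n * 2 + 2)).map (rowA n) := by
  unfold create_playground_with_dimensions
  have h1 : ∀ y : Int,
      (PySem.List.pyRange 0 (n * 2 + 2)).foldl (fun row x =>
        if x == 0 then
          if PySem.Int.mod y 2 == 0 && y != 0 then
            row ++ [PySem.Int.toStr (PySem.Int.floordiv y 2)]
          else
            row ++ [" "]
        else if y == 0 then
          if PySem.Int.mod x 2 == 0 && x != 0 then
            row ++ [PySem.Int.toStr x]
          else
            row ++ ["!"]
        else
          let row := if PySem.Int.mod y 2 == 0 && PySem.Int.mod x 2 == 0 then row ++ [" "] else row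
          let row := if PySem.Int.mod y 2 == 0 && PySem.Int.mod x 2 != 0 then row ++ ["|"] else row
          let row := if PySem.Int.mod y 2 != 0 && PySem.Int.mod x 2 == 0 then row ++ [" --- "] else row
          if PySem.Int.mod y 2 != 0 && PySem.Int.mod x 2 != 0 then row ++ ["+"] else row) []
      = rowA n y := by
    intro y
    have hfun : (fun (row : List String) (x : Int) =>
        if x == 0 then
          if PySem.Int.mod y 2 == 0 && y != 0 then
            row ++ [PySem.Int.toStr (PySem.Int.floordiv y 2)]
          else
            row ++ [" "]
        else if y == 0 then
          if PySem.Int.mod x 2 == 0 && x != 0 then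
            row ++ [PySem.Int.toStr x]
          else
            row ++ ["!"]
        else
          let row := if PySem.Int.mod y 2 == 0 && PySem.Int.mod x 2 == 0 then row ++ [" "] else row
          let row := if PySem.Int.mod y 2 == 0 && PySem.Int.mod x 2 != 0 then row ++ ["|"] else row
          let row := if PySem.Int.mod y 2 != 0 && PySem.Int.mod x 2 == 0 then row ++ [" --- "] else row
          if PySem.Int.mod y 2 != 0 && PySem.Int.mod x 2 != 0 then row ++ ["+"] else row)
        = fun row x => row ++ [cellA y x] :=
      funext fun row => funext fun x => cellA_step y x row
    rw [hfun, PySem.List.foldl_append_singleton_eq_map]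
    simp [rowA]
  simp only [h1]
  exact PySem.List.foldl_append_singleton_eq_map (rowA n) _ []

def rowB (n y : Int) : List String :=
  if PySem.Int.mod y 2 != 0 then
    [" "] ++ ((List.replicate n.toNat ["+", " --- "]).flatten ++ ["+"])
  else
    [PySem.Int.toStr (PySem.Int.floordiv y 2)] ++ ((List.replicate n.toNat ["|", " "]).flatten ++ ["|"])

def headerB (n : Int) : List String :=
  ([" "] ++ (PySem.List.pyRange 1 (n + 1)).flatMap (fun k => ["!", PySem.Int.toStr (2 * k)])) ++ ["!"]

lemma B_normal (n : Int) (hn : ¬ n < 0) :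
    create_playground_with_dimensions_alt n
      = headerB n :: (PySem.List.pyRange 1 (2 * n + 2)).map (rowB n) := by
  unfold create_playground_with_dimensions_alt headerB rowB
  simp only [if_neg hn]
  rw [PySem.List.foldl_append_singleton_eq_map (fun y =>
    if PySem.Int.mod y 2 != 0 then [" "] ++ ((List.replicate n.toNat ["+", " --- "]).flatten ++ ["+"])
    else [PySem.Int.toStr (PySem.Int.floordiv y 2)] ++ ((List.replicate n.toNat ["|", " "]).flatten ++ ["|"]))]
  rw [PySem.List.foldl_append_eq_flatMap]
  simp [List.flatMap_def]

-- the alternating tail pattern shared by the body rows, by induction on N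
lemma tail_pattern (a b : String) (f : Int → String)
    (hf : ∀ x : Int, 1 ≤ x → f x = if PySem.Int.mod x 2 == 0 then b else a) :
    ∀ N : Nat, (PySem.List.pyRange 1 (2 * (N : Int) + 2)).map f
      = (List.replicate N [a, b]).flatten ++ [a] := by
  intro N
  induction N with
  | zero =>
      have h1 : PySem.List.pyRange 1 (2 * ((0 : Nat) : Int) + 2) = [1] := by decide
      rw [h1]
      simp [hf 1 (by omega), PySem.Int.mod]
  | succ m ih =>
      have e : 2 * ((m + 1 : Nat) : Int) + 2 = (2 * (m : Int) + 2 + 1) + 1 := by push_cast; ring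
      rw [e, PySem.List.pyRange_one_succ_right (by omega),
          PySem.List.pyRange_one_succ_right (by omega)]
      have hmodE : PySem.Int.mod (2 * (m : Int) + 2) 2 = 0 := by
        rw [PySem.Int.mod_eq_emod_of_pos (by omega)]; omega
      have hmodO : PySem.Int.mod (2 * (m : Int) + 2 + 1) 2 = 1 := by
        rw [PySem.Int.mod_eq_emod_of_pos (by omega)]; omega
      rw [List.replicate_succ']
      simp only [List.map_append, ih, List.map_cons, List.map_nil,
        hf (2 * (m : Int) + 2) (by omega), hf (2 * (m : Int) + 2 + 1) (by omega),
        hmodE, hmodO, List.flatten_append]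
      simp

-- the header tail pattern, by induction on N
lemma header_pattern (f : Int → String)
    (hf : ∀ x : Int, 1 ≤ x → f x = if PySem.Int.mod x 2 == 0 then PySem.Int.toStr x else "!") :
    ∀ N : Nat, (PySem.List.pyRange 1 (2 * (N : Int) + 2)).map f
      = (PySem.List.pyRange 1 ((N : Int) + 1)).flatMap (fun k => ["!", PySem.Int.toStr (2 * k)]) ++ ["!"] := by
  intro N
  induction N with
  | zero =>
      have h1 : PySem.List.pyRange 1 (2 * ((0 : Nat) : Int) + 2) = [1] := by decide
      have h2 : PySem.List.pyRange 1 (((0 : Nat) : Int) + 1) = [] := by decide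
      rw [h1, h2]
      simp [hf 1 (by omega), PySem.Int.mod]
  | succ m ih =>
      have e : 2 * ((m + 1 : Nat) : Int) + 2 = (2 * (m : Int) + 2 + 1) + 1 := by push_cast; ring
      have e2 : ((m + 1 : Nat) : Int) + 1 = ((m : Int) + 1) + 1 := by push_cast; ring
      rw [e, e2, PySem.List.pyRange_one_succ_right (by omega),
          PySem.List.pyRange_one_succ_right (by omega),
          PySem.List.pyRange_one_succ_right (by omega)]
      have hmodE : PySem.Int.mod (2 * (m : Int) + 2) 2 = 0 := by
        rw [PySem.Int.mod_eq_emod_of_pos (by omega)]; omega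
      have hmodO : PySem.Int.mod (2 * (m : Int) + 2 + 1) 2 = 1 := by
        rw [PySem.Int.mod_eq_emod_of_pos (by omega)]; omega
      have ht : PySem.Int.toStr (2 * (m : Int) + 2) = PySem.Int.toStr (2 * ((m : Int) + 1)) := by
        ring_nf
      simp only [List.map_append, ih, List.map_cons, List.map_nil,
        hf (2 * (m : Int) + 2) (by omega), hf (2 * (m : Int) + 2 + 1) (by omega),
        hmodE, hmodO, List.flatMap_append]
      simp [ht]

lemma row_eq (n : Int) (hn : ¬ n < 0) (y : Int) (hy : 1 ≤ y) :
    rowA n y = rowB n y := by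
  obtain ⟨N, hN⟩ : ∃ N : Nat, n = (N : Int) := ⟨n.toNat, by omega⟩
  have hw : n * 2 + 2 = 2 * (N : Int) + 2 := by omega
  have htoNat : n.toNat = N := by omega
  unfold rowA rowB
  rw [hw, htoNat, PySem.List.pyRange_one_cons (by omega)]
  have hy0 : (y == 0) = false := by simp; omega
  have hmody : PySem.Int.mod y 2 = y % 2 := PySem.Int.mod_eq_emod_of_pos (by omega)
  by_cases hpar : y % 2 = 0
  · -- even row: label then pipe tail
    have hc0 : cellA y 0 = PySem.Int.toStr (PySem.Int.floordiv y 2) := by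
      unfold cellA; simp [hpar]; omega
    have htail := tail_pattern "|" " " (cellA y)
      (fun x hx => by
        unfold cellA
        have hx0 : (x == 0) = false := by simp; omega
        simp [hx0, hy0, hpar]) N
    simp only [List.map_cons, hc0]
    simp [hpar]
    exact htail
  · -- odd row: blank then plus tail
    have hc0 : cellA y 0 = " " := by
      unfold cellA; simp; omega
    have htail := tail_pattern "+" " --- " (cellA y)
      (fun x hx => by
        unfold cellA
        have hx0 : (x == 0) = false := by simp; omega
        simp [hx0, hy0, hpar]) N
    simp only [List.map_cons, hc0]
    simp [hpar]
    exact htail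

lemma header_eq (n : Int) (hn : ¬ n < 0) : rowA n 0 = headerB n := by
  obtain ⟨N, hN⟩ : ∃ N : Nat, n = (N : Int) := ⟨n.toNat, by omega⟩
  have hw : n * 2 + 2 = 2 * (N : Int) + 2 := by omega
  unfold rowA headerB
  rw [hw, PySem.List.pyRange_one_cons (by omega)]
  have hc0 : cellA 0 0 = " " := by unfold cellA; simp
  have htail := header_pattern (cellA 0)
    (fun x hx => by
      unfold cellA
      have hx0 : (x == 0) = false := by simp; omega
      have hxne : ¬x = 0 := by omega
      simp [hx0, PySem.Int.mod, hxne]) N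
  have hN1 : (N : Int) + 1 = n + 1 := by omega
  rw [hN1] at htail
  simp only [List.map_cons, hc0]
  simp
  exact htail

-- ===== VERDICT (by name: the statement is the Claim_ definition above) =====
theorem create_playground_with_dimensions_spec : Claim_equal_create_playground_with_dimensions := by
  intro n _
  unfold Spec_create_playground_with_dimensions
  by_cases hn : n < 0
  · have hA : PySem.List.pyRange 0 (n * 2 + 2) = [] := by
      simp [PySem.List.pyRange]; omega
    unfold create_playground_with_dimensions create_playground_with_dimensions_alt
    simp [hA, if_pos hn]
  · rw [A_normal, B_normal n hn]
    have hw : n * 2 + 2 = 2 * n + 2 := by ring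
    rw [hw, PySem.List.pyRange_one_cons (by omega)]
    simp only [List.map_cons]
    congr 1
    · exact header_eq n hn
    · exact List.map_congr_left (fun y hy => by
        have := PySem.List.mem_pyRange_one.mp hy
        exact row_eq n hn y this.1)
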